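-- pv_equiv track=rewrite | github.com/unixpickle/cah-ai | scripts/simulate_game.py | answer_combinations
-- ===== SOURCE A (Python) =====
-- import itertools
-- from typing import List, Tuple
--
-- def answer_combinations(
--     hand: List[str], pick: int
-- ) -> Tuple[List[str], List[List[int]]]:
--     strs = []
--     indices = []
--     for combo in itertools.product(*([range(len(hand))] * pick)):
--         if len(set(combo)) != len(combo):
--             # Using one card multiple times.
--             continue
--         strs.append(" ".join(hand[i] for i in combo))
--         indices.append(combo)
--     return strs, indices
-- ===== SOURCE B (Python) =====
-- import itertools
-- from typing import List, Tuple
--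
--
-- def answer_combinations(
--     hand: List[str], pick: int
-- ) -> Tuple[List[str], List[List[int]]]:
--     indices = list(itertools.permutations(range(len(hand)), pick))
--     strs = [" ".join(hand[i] for i in combo) for combo in indices]
--     return strs, indices
-- ===== Notes on version B (the rewrite author's own statement) =====
-- stated objective: idiomatic
-- what changed: Replaces the cartesian product of index ranges plus a distinctness filter with a direct enumeration of k-permutations of the indices via itertools.permutations; Pre_ excludes negative pick, a degenerate corner where A happens to return a single empty combination while permutations raises ValueError.
-- outside the precondition, e.g. on answer_combinations(['a'], -1): A returns ([''], [[]]), B raises ValueError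
import Mathlib
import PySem

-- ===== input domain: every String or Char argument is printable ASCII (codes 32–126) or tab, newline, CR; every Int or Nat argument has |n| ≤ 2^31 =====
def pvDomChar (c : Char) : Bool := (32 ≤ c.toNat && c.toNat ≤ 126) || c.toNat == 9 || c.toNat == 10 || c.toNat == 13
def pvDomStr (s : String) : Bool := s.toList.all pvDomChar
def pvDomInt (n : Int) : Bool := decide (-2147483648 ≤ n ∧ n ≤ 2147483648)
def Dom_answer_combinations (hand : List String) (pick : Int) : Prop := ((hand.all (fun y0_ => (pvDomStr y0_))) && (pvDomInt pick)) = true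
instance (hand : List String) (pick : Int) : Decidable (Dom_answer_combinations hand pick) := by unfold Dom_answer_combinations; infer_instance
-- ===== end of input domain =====

-- B enumerates k-permutations of the hand's indices directly instead of filtering the full
-- cartesian product of index ranges for duplicate-free tuples; same return value (objective: idiomatic).


-- ===== PORT A =====
-- range(len(hand)) as Python ints
def pvRangeA (n : Nat) : List Int := (List.range n).map (fun i : Nat => (i : Int))
-- itertools.product(*([range(n)] * pick)): pick copies of range(n) (0 for pick <= 0), leftmost factor varies slowest
def pvProdA (n : Nat) : Nat → List (List Int)
  | 0 => [[]]
  | k + 1 => (pvRangeA n).flatMap (fun i => (pvProdA n k).map (fun c => i :: c))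
-- " ".join(hand[i] for i in combo) (shared by both ports)
def pvJoinA (hand : List String) (c : List Int) : String :=
  PySem.Str.join " " (c.map (fun i => PySem.List.pyGetD hand i ""))
-- the loop: skip any combo with a repeated index, else append the joined string and the combo
def answer_combinations (hand : List String) (pick : Int) : List String × List (List Int) :=
  (pvProdA hand.length pick.toNat).foldl
    (fun acc c =>
      if (PySem.Set.ofList c).length ≠ c.length then acc
      else (acc.1 ++ [pvJoinA hand c], acc.2 ++ [c]))
    ([], [])

-- ===== PORT B =====
-- itertools.permutations(pool, k): pick a first element, recurse on the pool without it (lexicographic order).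
-- Python's permutations raises ValueError for negative k; those inputs lie outside Pre_ below.
def pvPermsB (pool : List Int) : Nat → List (List Int)
  | 0 => [[]]
  | k + 1 => pool.flatMap (fun i => (pvPermsB (pool.erase i) k).map (fun c => i :: c))
def answer_combinations_alt (hand : List String) (pick : Int) : List String × List (List Int) :=
  if pick < 0 then ([], [])  -- Python B raises ValueError here; these inputs are outside Pre_ below
  else
    let indices := pvPermsB ((List.range hand.length).map (fun i : Nat => (i : Int))) pick.toNat
    (indices.map (fun c => pvJoinA hand c), indices)

-- ===== PRECONDITION & SPEC =====
-- Pre_ excludes negative pick: a degenerate corner where A's product over an empty list of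
-- ranges accidentally yields one empty combination, while B's itertools.permutations raises ValueError.
def Pre_answer_combinations (hand : List String) (pick : Int) : Prop := 0 ≤ pick
instance (hand : List String) (pick : Int) : Decidable (Pre_answer_combinations hand pick) := by unfold Pre_answer_combinations; infer_instance
def pvWitness_answer_combinations : List String × Int := (["a", "b"], 2)
def Spec_answer_combinations (hand : List String) (pick : Int) (out : List String × List (List Int)) : Prop := out = answer_combinations_alt hand pick
instance (hand : List String) (pick : Int) (out : List String × List (List Int)) : Decidable (Spec_answer_combinations hand pick out) := by unfold Spec_answer_combinations; infer_instance

-- ===== CLAIM (what is proved, stated in full; the proofs are below) =====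
def Claim_equal_answer_combinations : Prop := ∀ (hand : List String) (pick : Int), Dom_answer_combinations hand pick → Pre_answer_combinations hand pick → Spec_answer_combinations hand pick (answer_combinations hand pick)

-- ===== LEMMAS AND PROOFS =====

lemma pv_ofList_sublist (c : List Int) : (PySem.Set.ofList c).Sublist c := by
  induction c with
  | nil => simp [PySem.Set.ofList_nil]
  | cons x xs ih =>
      rw [PySem.Set.ofList_cons]
      refine List.Sublist.cons₂ x (List.Sublist.trans ?_ ih)
      simp [PySem.Set.discard]

lemma pv_setlen_eq_iff_nodup (c : List Int) :
    (PySem.Set.ofList c).length = c.length ↔ c.Nodup := by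
  constructor
  · intro h
    have := (pv_ofList_sublist c).eq_of_length h
    rw [← this]; exact PySem.Set.nodup_ofList c
  · intro h; rw [PySem.Set.ofList_eq_self_of_nodup c h]

lemma pv_foldl_accum (hand : List String) (L : List (List Int))
    (s0 : List String) (t0 : List (List Int)) :
    L.foldl
      (fun acc c =>
        if (PySem.Set.ofList c).length ≠ c.length then acc
        else (acc.1 ++ [pvJoinA hand c], acc.2 ++ [c]))
      (s0, t0)
    = (s0 ++ (L.filter (fun c => decide c.Nodup)).map (pvJoinA hand),
       t0 ++ L.filter (fun c => decide c.Nodup)) := by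
  induction L generalizing s0 t0 with
  | nil => simp
  | cons c L ih =>
      simp only [List.foldl_cons]
      by_cases h : c.Nodup
      · rw [if_neg (not_not.mpr ((pv_setlen_eq_iff_nodup c).mpr h))]
        rw [ih]
        simp [h]
      · rw [if_pos (fun he => h ((pv_setlen_eq_iff_nodup c).mp he))]
        rw [ih]
        simp [h]

lemma pv_prod_mem (n k : Nat) : ∀ c ∈ pvProdA n k, ∀ x ∈ c, x ∈ pvRangeA n := by
  induction k with
  | zero => simp [pvProdA]
  | succ k ih =>
      intro c hc x hx
      simp only [pvProdA, List.mem_flatMap, List.mem_map] at hc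
      obtain ⟨i, hi, c', hc', rfl⟩ := hc
      rcases List.mem_cons.mp hx with rfl | hx'
      · exact hi
      · exact ih c' hc' x hx'

lemma pv_filter_sublist {l pool : List Int} (hn : l.Nodup) (hs : pool.Sublist l) :
    l.filter (fun x => decide (x ∈ pool)) = pool := by
  induction hs with
  | slnil => simp
  | @cons p l a hsub ih =>
      have hn' : l.Nodup := (List.nodup_cons.mp hn).2
      have ha : a ∉ p := fun h => (List.nodup_cons.mp hn).1 (hsub.mem h)
      rw [List.filter_cons_of_neg (by simpa using ha), ih hn']
  | @cons₂ p l a hsub ih =>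
      have hal : a ∉ l := (List.nodup_cons.mp hn).1
      have hn' : l.Nodup := (List.nodup_cons.mp hn).2
      have h2 : List.filter (fun x => decide (x ∈ a :: p)) l
              = List.filter (fun x => decide (x ∈ p)) l := by
        apply List.filter_congr
        intro x hx
        simp only [List.mem_cons, decide_eq_decide]
        constructor
        · rintro (rfl | h)
          · exact absurd hx hal
          · exact h
        · exact Or.inr
      rw [List.filter_cons_of_pos (by simp), h2, ih hn']

lemma pv_range_nodup (n : Nat) : (pvRangeA n).Nodup := by
  unfold pvRangeA
  apply List.Nodup.map
  · intro a b h; simpa using h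
  · exact List.nodup_range

lemma pv_flatMap_guard {α : Type} (pool : List Int) (g : Int → List α) :
    ∀ l : List Int,
      l.flatMap (fun a => if a ∈ pool then g a else [])
        = (l.filter (fun a => decide (a ∈ pool))).flatMap g := by
  intro l
  induction l with
  | nil => simp
  | cons a l ih =>
      by_cases ha : a ∈ pool
      · simp [ha, ih]
      · simp [ha, ih]

lemma pv_prod_filter_eq_perms (n : Nat) (k : Nat) :
    ∀ pool : List Int, pool.Sublist (pvRangeA n) →
    (pvProdA n k).filter (fun c => decide (c.Nodup ∧ ∀ x ∈ c, x ∈ pool)) = pvPermsB pool k := by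
  induction k with
  | zero => intro pool _; simp [pvProdA, pvPermsB]
  | succ k ih =>
      intro pool hpool
      have hpn : pool.Nodup := hpool.nodup (pv_range_nodup n)
      have step1 : ∀ a : Int,
          (pvProdA n k).filter (fun c => decide ((a :: c).Nodup ∧ ∀ x ∈ a :: c, x ∈ pool))
            = if a ∈ pool then pvPermsB (pool.erase a) k else [] := by
        intro a
        by_cases ha : a ∈ pool
        · rw [if_pos ha, ← ih (pool.erase a) (List.Sublist.trans (List.erase_sublist) hpool)]
          apply List.filter_congr
          intro c _
          simp only [decide_eq_decide, List.nodup_cons, List.mem_cons, forall_eq_or_imp]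
          constructor
          · rintro ⟨⟨hac, hcn⟩, _, hmem⟩
            refine ⟨hcn, fun x hx => (hpn.mem_erase_iff).mpr ⟨?_, hmem x hx⟩⟩
            rintro rfl; exact hac hx
          · rintro ⟨hcn, hmem⟩
            refine ⟨⟨fun hac => ?_, hcn⟩, ha, fun x hx => ((hpn.mem_erase_iff).mp (hmem x hx)).2⟩
            exact ((hpn.mem_erase_iff).mp (hmem a hac)).1 rfl
        · rw [if_neg ha]
          apply List.filter_eq_nil_iff.mpr
          intro c _
          simp [ha]
      simp only [pvProdA, pvPermsB, List.filter_flatMap, List.filter_map, Function.comp_def]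
      simp only [step1]
      have step2 : ∀ a : Int,
          List.map (fun c => a :: c) (if a ∈ pool then pvPermsB (pool.erase a) k else [])
            = if a ∈ pool then List.map (fun c => a :: c) (pvPermsB (pool.erase a) k) else [] := by
        intro a; split <;> rfl
      simp only [step2]
      rw [pv_flatMap_guard pool _ (pvRangeA n), pv_filter_sublist (pv_range_nodup n) hpool]

-- ===== VERDICT (by name: the statement is the Claim_ definition above) =====
theorem answer_combinations_spec : Claim_equal_answer_combinations := by
  intro hand pick _ hpre
  unfold Spec_answer_combinations
  unfold answer_combinations answer_combinations_alt
  have hp : (0:Int) ≤ pick := hpre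
  rw [if_neg (by omega)]
  rw [pv_foldl_accum]
  have hfil : (pvProdA hand.length pick.toNat).filter (fun c => decide c.Nodup)
      = (pvProdA hand.length pick.toNat).filter
          (fun c => decide (c.Nodup ∧ ∀ x ∈ c, x ∈ pvRangeA hand.length)) := by
    apply List.filter_congr
    intro c hc
    simp only [decide_eq_decide]
    exact (and_iff_left (pv_prod_mem hand.length pick.toNat c hc)).symm
  rw [hfil, pv_prod_filter_eq_perms hand.length pick.toNat (pvRangeA hand.length) (List.Sublist.refl _)]
  simp only [List.nil_append, pvJoinA]
  rfl
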